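-- pv_equiv track=rewrite | github.com/Nitesh-777/Computational-Intelligence | experimental_study/es_algs.py | group_based_rep
-- ===== SOURCE A (Python) =====
-- def group_based_rep(sl, pl, q, cutoff):
--
--     # Generates all valid activities based on the pieces, their quantities, and constraints
--     def stock_activities(pl, quantities, max_length, cutoff):
--
--         # Recursively builds valid activities while adhering to constraints
--         def check_activity(activity, start, remaining_q):
--             total_length = sum(activity)
--             max_unused = max_length - total_length
--
--             # Check if activity is valid based on length constraints
--             if total_length <= max_length and max_unused <= cutoff:
--                 yield activity
--
--             # Stop recursion if total length exceeds the max allowed length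
--             if total_length >= max_length:
--                 return
--
--             # Iterate through available pieces to construct new activities
--             for i in range(start, len(pl)):
--                 if remaining_q[i] > 0:
--                     next_remaining_quantities = remaining_q.copy()
--                     next_remaining_quantities[i] -= 1
--                     yield from check_activity(activity + [pl[i]], i, next_remaining_quantities)
--
--         # Initialise quantities for available pieces
--         initial_quantities = [quantities[pl.index(x)] for x in pl]
--         yield from check_activity([], 0, initial_quantities)
--
--     final_activities = []
--     for length in sl:
--
--         # Generate activities for each stock length in 'sl'
--         activities = list(stock_activities(pl, q, length, cutoff))
--         final_activities.append(activities)
--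
--     # Calculate the total number of activities generated
--     activities_length = sum(len(activities) for activities in final_activities)
--     return final_activities
-- ===== SOURCE B (Python) =====
-- def group_based_rep(sl, pl, q, cutoff):
--     # Iterative DFS with an explicit stack of (activity, start, remaining_q) frames,
--     # replacing the nested recursive generator; children are pushed in reverse index
--     # order so the pop order reproduces the recursion's pre-order exactly.
--     n = len(pl)
--     final_activities = []
--     for max_length in sl:
--         init_q = [q[pl.index(x)] for x in pl]
--         acts = []
--         stack = [([], 0, init_q)]
--         while stack:
--             activity, start, rq = stack.pop()
--             total = sum(activity)
--             if total <= max_length and max_length - total <= cutoff: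
--                 acts.append(activity)
--             if total >= max_length:
--                 continue
--             children = []
--             for i in range(start, n):
--                 if rq[i] > 0:
--                     nq = rq.copy()
--                     nq[i] -= 1
--                     children.append((activity + [pl[i]], i, nq))
--             stack.extend(reversed(children))
--         final_activities.append(acts)
--     return final_activities
-- ===== Notes on version B (the rewrite author's own statement) =====
-- stated objective: alternative
-- what changed: The nested recursive generator is replaced by an iterative depth-first search over an explicit stack of (activity, start, remaining-quantities) frames, with children pushed in reverse index order so the pop order reproduces the original pre-order emission exactly.
import Mathlib
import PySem

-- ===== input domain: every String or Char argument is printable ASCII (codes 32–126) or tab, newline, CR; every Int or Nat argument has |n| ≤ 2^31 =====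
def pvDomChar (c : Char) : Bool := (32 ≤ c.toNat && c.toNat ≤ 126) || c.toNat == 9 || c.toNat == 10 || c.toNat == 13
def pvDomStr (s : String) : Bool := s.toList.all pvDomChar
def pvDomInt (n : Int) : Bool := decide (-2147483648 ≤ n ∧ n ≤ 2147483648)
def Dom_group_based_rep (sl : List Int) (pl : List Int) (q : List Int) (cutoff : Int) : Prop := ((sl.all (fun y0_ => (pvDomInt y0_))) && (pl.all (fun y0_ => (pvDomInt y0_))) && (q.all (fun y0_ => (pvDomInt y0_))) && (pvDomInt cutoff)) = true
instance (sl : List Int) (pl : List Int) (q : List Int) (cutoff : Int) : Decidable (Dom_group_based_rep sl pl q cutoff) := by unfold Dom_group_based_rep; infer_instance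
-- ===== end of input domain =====

-- B replaces A's nested recursive generator by an iterative explicit-stack DFS that
-- emits the same activities in the same pre-order (objective: alternative, same cost).


-- sum of the positive parts of the remaining quantities: strictly decreases at each
-- recursive call / child frame, used as (part of) both termination measures
def pvSumPos (rq : List Int) : Nat := (rq.map Int.toNat).sum

theorem pvSumPos_set_lt (rq : List Int) (i : Nat) (h : 0 < rq.getD i 0) :
    pvSumPos (rq.set i (rq.getD i 0 - 1)) < pvSumPos rq := by
  induction rq generalizing i with
  | nil => simp [List.getD] at h
  | cons a t ih =>
    cases i with
    | zero =>
      simp [List.getD] at h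
      simp [pvSumPos, List.getD]
      omega
    | succ j =>
      simp [List.getD] at h ⊢
      have := ih j (by simpa [List.getD] using h)
      simp [pvSumPos] at this ⊢
      omega

-- ===== PORT A =====
-- initial_quantities = [q[pl.index(x)] for x in pl]; under Pre_ every index? hits and
-- its value is < q.length, so the getD defaults never fire there
def pvInitQ (pl q : List Int) : List Int :=
  pl.map (fun x => q.getD ((PySem.List.index? pl x).getD 0) 0)

-- check_activity (the recursive generator) and its inner 'for i in range(start, len(pl))'
-- loop; rq always has length pl.length, so with the loop guard i < pl.length and the
-- test 0 < rq.getD i 0 the getD/set accesses are exact ports of pl[i], rq[i]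
mutual
def pvCheckA (pl : List Int) (cutoff maxLen : Int) (activity : List Int) (start : Nat) (rq : List Int) : List (List Int) :=
  let total := activity.sum
  let maxUnused := maxLen - total
  let base := if total ≤ maxLen ∧ maxUnused ≤ cutoff then [activity] else []
  if maxLen ≤ total then base
  else base ++ pvLoopA pl cutoff maxLen activity rq start
termination_by (pvSumPos rq, pl.length + 1)

def pvLoopA (pl : List Int) (cutoff maxLen : Int) (activity : List Int) (rq : List Int) (i : Nat) : List (List Int) :=
  if hi : i < pl.length then
    (if hq : 0 < rq.getD i 0 then
       pvCheckA pl cutoff maxLen (activity ++ [pl.getD i 0]) i (rq.set i (rq.getD i 0 - 1))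
     else []) ++ pvLoopA pl cutoff maxLen activity rq (i + 1)
  else []
termination_by (pvSumPos rq, pl.length - i)
decreasing_by
  · exact Prod.Lex.left _ _ (pvSumPos_set_lt rq i hq)
  · exact Prod.Lex.right _ (by omega)
end

def group_based_rep (sl : List Int) (pl : List Int) (q : List Int) (cutoff : Int) : List (List (List Int)) :=
  let finalActivities := sl.map (fun len => pvCheckA pl cutoff len [] 0 (pvInitQ pl q))
  -- activities_length = sum(...) is computed by A but unused
  let _activitiesLength := (finalActivities.map List.length).sum
  finalActivities

-- ===== PORT B =====
-- the weight of a stack: termination measure for the explicit-stack DFS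
def pvStackW (n : Nat) (stack : List (List Int × Nat × List Int)) : Nat :=
  (stack.map (fun f => (n + 1) ^ pvSumPos f.2.2)).sum

theorem pvChildrenW_lt (n : Nat) (rq : List Int) (start : Nat)
    (mk : Nat → List Int × Nat × List Int)
    (hmk : ∀ i, (mk i).2.2 = rq.set i (rq.getD i 0 - 1)) :
    pvStackW n (((List.range' start (n - start)).filter (fun i => decide (0 < rq.getD i 0))).map mk)
      < (n + 1) ^ pvSumPos rq := by
  by_cases hL : (List.range' start (n - start)).filter (fun i => decide (0 < rq.getD i 0)) = []
  · rw [hL]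
    simp [pvStackW]
  · obtain ⟨i0, hi0⟩ := List.exists_mem_of_ne_nil _ hL
    have hp0 : 0 < rq.getD i0 0 := by simpa using (List.mem_filter.mp hi0).2
    have hkpos : 0 < pvSumPos rq := lt_of_le_of_lt (Nat.zero_le _) (pvSumPos_set_lt rq i0 hp0)
    have hbound : ∀ x ∈ (((List.range' start (n - start)).filter (fun i => decide (0 < rq.getD i 0))).map mk).map
        (fun f => (n + 1) ^ pvSumPos f.2.2), x ≤ (n + 1) ^ (pvSumPos rq - 1) := by
      intro x hx
      rw [List.map_map, List.mem_map] at hx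
      obtain ⟨i, hi, rfl⟩ := hx
      have hpi : 0 < rq.getD i 0 := by simpa using (List.mem_filter.mp hi).2
      simp only [Function.comp, hmk]
      exact Nat.pow_le_pow_right (by omega) (by have := pvSumPos_set_lt rq i hpi; omega)
    have hsum := List.sum_le_card_nsmul _ _ hbound
    simp only [smul_eq_mul, List.length_map] at hsum
    have hlen : ((List.range' start (n - start)).filter (fun i => decide (0 < rq.getD i 0))).length ≤ n := by
      have h1 := List.length_filter_le (fun i => decide (0 < rq.getD i 0)) (List.range' start (n - start))
      simp only [List.length_range'] at h1
      omega
    have hB : 0 < (n + 1) ^ (pvSumPos rq - 1) := Nat.pow_pos (by omega)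
    have h1eq : pvSumPos rq - 1 + 1 = pvSumPos rq := by omega
    have hpow : (n + 1) ^ (pvSumPos rq - 1) * (n + 1) = (n + 1) ^ pvSumPos rq := by
      have := (pow_succ (n + 1) (pvSumPos rq - 1)).symm
      rwa [h1eq] at this
    calc pvStackW n (((List.range' start (n - start)).filter (fun i => decide (0 < rq.getD i 0))).map mk)
        ≤ ((List.range' start (n - start)).filter (fun i => decide (0 < rq.getD i 0))).length * (n + 1) ^ (pvSumPos rq - 1) := hsum
      _ ≤ n * (n + 1) ^ (pvSumPos rq - 1) := Nat.mul_le_mul_right _ hlen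
      _ < (n + 1) ^ (pvSumPos rq - 1) * (n + 1) := by nlinarith [hB]
      _ = (n + 1) ^ pvSumPos rq := hpow

-- the while loop over the explicit stack (head of the list = top of the Python stack;
-- children are collected in increasing index order and pushed reversed, so prepending
-- them models stack.extend(reversed(children)) followed by pop() exactly)
def pvRunB (pl : List Int) (cutoff maxLen : Int) : List (List Int × Nat × List Int) → List (List Int)
  | [] => []
  | (activity, start, rq) :: rest =>
    let total := activity.sum
    let emit := if total ≤ maxLen ∧ maxLen - total ≤ cutoff then [activity] else []
    if maxLen ≤ total then emit ++ pvRunB pl cutoff maxLen rest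
    else
      let children := ((List.range' start (pl.length - start)).filter (fun i => decide (0 < rq.getD i 0))).map
        (fun i => (activity ++ [pl.getD i 0], i, rq.set i (rq.getD i 0 - 1)))
      emit ++ pvRunB pl cutoff maxLen (children ++ rest)
termination_by stack => pvStackW pl.length stack
decreasing_by
  · simp [pvStackW]
  · simp only [pvStackW, List.map_append, List.sum_append, List.map_cons, List.sum_cons]
    have := pvChildrenW_lt pl.length rq start
      (fun i => (activity ++ [pl.getD i 0], i, rq.set i (rq.getD i 0 - 1))) (fun i => rfl)
    simp only [pvStackW] at this
    omega

def group_based_rep_alt (sl : List Int) (pl : List Int) (q : List Int) (cutoff : Int) : List (List (List Int)) :=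
  sl.map (fun maxLen =>
    let initq := pl.map (fun x => q.getD ((PySem.List.index? pl x).getD 0) 0)
    pvRunB pl cutoff maxLen [([], 0, initq)])

-- ===== PRECONDITION & SPEC =====
-- Pre_ excludes exactly the inputs where the comprehension q[pl.index(x)] raises
-- IndexError (some stock length is processed and the first-occurrence index of some
-- piece is out of range of q); B's identical per-length initialisation raises there too.
def Pre_group_based_rep (sl : List Int) (pl : List Int) (q : List Int) (cutoff : Int) : Prop :=
  sl ≠ [] → ∀ x ∈ pl, pl.idxOf x < q.length
instance (sl : List Int) (pl : List Int) (q : List Int) (cutoff : Int) : Decidable (Pre_group_based_rep sl pl q cutoff) := by unfold Pre_group_based_rep; infer_instance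

def pvWitness_group_based_rep : List Int × List Int × List Int × Int := ([5, 7], [2, 3], [2, 1], 1)

def Spec_group_based_rep (sl : List Int) (pl : List Int) (q : List Int) (cutoff : Int) (out : List (List (List Int))) : Prop := out = group_based_rep_alt sl pl q cutoff
instance (sl : List Int) (pl : List Int) (q : List Int) (cutoff : Int) (out : List (List (List Int))) : Decidable (Spec_group_based_rep sl pl q cutoff out) := by unfold Spec_group_based_rep; infer_instance

-- ===== CLAIM (what is proved, stated in full; the proofs are below) =====
def Claim_equal_group_based_rep : Prop := ∀ (sl : List Int) (pl : List Int) (q : List Int) (cutoff : Int), Dom_group_based_rep sl pl q cutoff → Pre_group_based_rep sl pl q cutoff → Spec_group_based_rep sl pl q cutoff (group_based_rep sl pl q cutoff)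

-- ===== LEMMAS AND PROOFS =====

-- A's inner for-loop from index i = the flatten of the recursive results over the
-- still-available indices ≥ i (in increasing order)
theorem pvLoopA_eq_flatten (pl : List Int) (cutoff maxLen : Int) (activity : List Int) (rq : List Int) (i : Nat) :
    pvLoopA pl cutoff maxLen activity rq i =
      (((List.range' i (pl.length - i)).filter (fun j => decide (0 < rq.getD j 0))).map
        (fun j => pvCheckA pl cutoff maxLen (activity ++ [pl.getD j 0]) j (rq.set j (rq.getD j 0 - 1)))).flatten := by
  generalize hd : pl.length - i = d
  induction d generalizing i with
  | zero =>
    have hni : ¬ i < pl.length := by omega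
    rw [pvLoopA]
    simp [hni]
  | succ d ih =>
    have hi : i < pl.length := by omega
    rw [pvLoopA]
    by_cases hq : 0 < rq[i]?.getD 0 <;>
      simp [hi, hq, List.getD, List.filter_cons, List.range'_succ, List.getElem?_eq_getElem hi,
        ih (i + 1) (by omega)]

-- processing a block of frames whose single-frame behaviour is known = flatten of the
-- per-frame recursions followed by the rest of the stack
theorem pvRunB_append (pl : List Int) (cutoff maxLen : Int) (cs rest : List (List Int × Nat × List Int))
    (h : ∀ c ∈ cs, ∀ st, pvRunB pl cutoff maxLen (c :: st) =
        pvCheckA pl cutoff maxLen c.1 c.2.1 c.2.2 ++ pvRunB pl cutoff maxLen st) :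
    pvRunB pl cutoff maxLen (cs ++ rest) =
      (cs.map (fun c => pvCheckA pl cutoff maxLen c.1 c.2.1 c.2.2)).flatten ++ pvRunB pl cutoff maxLen rest := by
  induction cs with
  | nil => simp
  | cons c cs ih =>
    rw [List.cons_append, h c (by simp), ih (fun c' hc' st => h c' (by simp [hc']) st)]
    simp

-- the main invariant: popping one frame produces exactly what A's recursion produces
-- for that frame, followed by the processing of the remaining stack
theorem pvRunB_cons (pl : List Int) (cutoff maxLen : Int) (activity : List Int) (start : Nat)
    (rq : List Int) (rest : List (List Int × Nat × List Int)) :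
    pvRunB pl cutoff maxLen ((activity, start, rq) :: rest) =
      pvCheckA pl cutoff maxLen activity start rq ++ pvRunB pl cutoff maxLen rest := by
  suffices H : ∀ n rq, pvSumPos rq = n → ∀ (activity : List Int) (start : Nat)
      (rest : List (List Int × Nat × List Int)),
      pvRunB pl cutoff maxLen ((activity, start, rq) :: rest) =
        pvCheckA pl cutoff maxLen activity start rq ++ pvRunB pl cutoff maxLen rest by
    exact H _ rq rfl activity start rest
  intro n
  induction n using Nat.strong_induction_on with
  | _ n ih =>
    intro rq hrq activity start rest
    rw [pvRunB, pvCheckA]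
    by_cases hml : maxLen ≤ activity.sum
    · simp [hml]
    · simp only [hml, if_false]
      have hchild : ∀ c ∈ ((List.range' start (pl.length - start)).filter
            (fun i => decide (0 < rq.getD i 0))).map
            (fun i => (activity ++ [pl.getD i 0], i, rq.set i (rq.getD i 0 - 1))),
          ∀ st, pvRunB pl cutoff maxLen (c :: st) =
            pvCheckA pl cutoff maxLen c.1 c.2.1 c.2.2 ++ pvRunB pl cutoff maxLen st := by
        intro c hc st
        rw [List.mem_map] at hc
        obtain ⟨i, hi, rfl⟩ := hc
        have hpi : 0 < rq.getD i 0 := by simpa using (List.mem_filter.mp hi).2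
        exact ih _ (hrq ▸ pvSumPos_set_lt rq i hpi) _ rfl _ _ _
      rw [pvRunB_append _ _ _ _ _ hchild, pvLoopA_eq_flatten]
      simp [List.map_map, Function.comp_def]

-- ===== VERDICT (by name: the statement is the Claim_ definition above) =====
theorem group_based_rep_spec : Claim_equal_group_based_rep := by
  intro sl pl q cutoff _ _
  unfold Spec_group_based_rep group_based_rep group_based_rep_alt pvInitQ
  refine List.map_congr_left (fun len _ => ?_)
  rw [pvRunB_cons]
  simp [pvRunB]
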